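-- pv_equiv track=rewrite | github.com/Srk40/Lab_algoritmos_2 | Exercicios_matrizes.py | largest_product
-- ===== SOURCE A (Python) =====
-- def largest_product(matrix):
--     n = len(matrix)
--     max_product = 0
--
--     for i in range(n):
--         for j in range(n):
--             if j + 4 < n:
--                 product = matrix[i][j] * matrix[i][j + 1] * matrix[i][j + 2] * matrix[i][j + 3] * matrix[i][j + 4]
--                 max_product = max(max_product, product)
--             if i + 4 < n:
--                 product = matrix[i][j] * matrix[i + 1][j] * matrix[i + 2][j] * matrix[i + 3][j] * matrix[i + 4][j]
--                 max_product = max(max_product, product)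
--             if i + 4 < n and j + 4 < n:
--                 product = matrix[i][j] * matrix[i + 1][j + 1] * matrix[i + 2][j + 2] * matrix[i + 3][j + 3] * matrix[i + 4][j + 4]
--                 max_product = max(max_product, product)
--
--     return max_product
-- ===== SOURCE B (Python) =====
-- def largest_product(matrix):
--     n = len(matrix)
--     if n < 5:
--         return 0
--     lines = []
--     for i in range(n):
--         lines.append([matrix[i][j] for j in range(n)])           # rows
--     for j in range(n):
--         lines.append([matrix[i][j] for i in range(n)])           # columns
--     for j in range(n):
--         lines.append([matrix[k][j + k] for k in range(n - j)])   # diagonals from top row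
--     for i in range(1, n):
--         lines.append([matrix[i + k][k] for k in range(n - i)])   # diagonals from left column
--     best = 0
--     for line in lines:
--         for s in range(len(line) - 4):
--             best = max(best, line[s] * line[s + 1] * line[s + 2] * line[s + 3] * line[s + 4])
--     return best
-- ===== Notes on version B (the rewrite author's own statement) =====
-- stated objective: alternative
-- what changed: B replaces A's single double loop with three inline conditional products per cell by a two-phase pass: first build every line (rows, columns, down-right diagonals) as an explicit list, then slide a 5-element window over each line and fold max over the window products.
import Mathlib
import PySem

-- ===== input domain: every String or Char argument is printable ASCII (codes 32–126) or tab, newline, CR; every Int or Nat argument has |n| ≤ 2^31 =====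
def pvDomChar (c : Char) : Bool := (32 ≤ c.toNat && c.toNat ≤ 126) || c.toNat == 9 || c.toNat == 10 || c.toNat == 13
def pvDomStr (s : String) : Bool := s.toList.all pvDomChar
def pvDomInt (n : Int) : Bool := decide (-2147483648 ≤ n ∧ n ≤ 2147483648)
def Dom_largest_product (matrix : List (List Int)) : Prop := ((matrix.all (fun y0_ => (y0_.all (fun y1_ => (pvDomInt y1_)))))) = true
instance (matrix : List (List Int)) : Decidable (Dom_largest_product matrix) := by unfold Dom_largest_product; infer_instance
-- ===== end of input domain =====

-- B replaces A's per-cell inline three-condition checks by a two-phase pass — build all lines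
-- (rows, columns, down-right diagonals), then slide a 5-window over each line
-- (objective: alternative decomposition, same asymptotic cost).

-- ===== PORT A =====
-- matrix[i][j], total form (Pre_ excludes the out-of-range accesses on which Python raises)
def pvCellA (matrix : List (List Int)) (i j : Int) : Int :=
  PySem.List.pyGetD (PySem.List.pyGetD matrix i []) j 0

def largest_product (matrix : List (List Int)) : Int :=
  let n : Int := matrix.length
  (PySem.List.pyRange 0 n 1).foldl (fun mp i =>
    (PySem.List.pyRange 0 n 1).foldl (fun mp j =>
      let mp := if j + 4 < n then
          max mp (pvCellA matrix i j * pvCellA matrix i (j+1) * pvCellA matrix i (j+2) *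
                  pvCellA matrix i (j+3) * pvCellA matrix i (j+4))
        else mp
      let mp := if i + 4 < n then
          max mp (pvCellA matrix i j * pvCellA matrix (i+1) j * pvCellA matrix (i+2) j *
                  pvCellA matrix (i+3) j * pvCellA matrix (i+4) j)
        else mp
      let mp := if i + 4 < n ∧ j + 4 < n then
          max mp (pvCellA matrix i j * pvCellA matrix (i+1) (j+1) * pvCellA matrix (i+2) (j+2) *
                  pvCellA matrix (i+3) (j+3) * pvCellA matrix (i+4) (j+4))
        else mp
      mp) mp) 0

-- ===== PORT B =====
-- matrix[i][j] as read by Source B's line-building comprehensions (total form; same Pre_)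
def pvCellB (matrix : List (List Int)) (i j : Int) : Int :=
  PySem.List.pyGetD (PySem.List.pyGetD matrix i []) j 0

-- line[s] * line[s+1] * line[s+2] * line[s+3] * line[s+4]
def pvWin (line : List Int) (s : Int) : Int :=
  PySem.List.pyGetD line s 0 * PySem.List.pyGetD line (s+1) 0 * PySem.List.pyGetD line (s+2) 0 *
  PySem.List.pyGetD line (s+3) 0 * PySem.List.pyGetD line (s+4) 0

def largest_product_alt (matrix : List (List Int)) : Int :=
  let n : Int := matrix.length
  if n < 5 then 0 else
  let lines : List (List Int) :=
    (PySem.List.pyRange 0 n 1).map (fun i => (PySem.List.pyRange 0 n 1).map (fun j => pvCellB matrix i j))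
    ++ (PySem.List.pyRange 0 n 1).map (fun j => (PySem.List.pyRange 0 n 1).map (fun i => pvCellB matrix i j))
    ++ (PySem.List.pyRange 0 n 1).map (fun j => (PySem.List.pyRange 0 (n - j) 1).map (fun k => pvCellB matrix k (j + k)))
    ++ (PySem.List.pyRange 1 n 1).map (fun i => (PySem.List.pyRange 0 (n - i) 1).map (fun k => pvCellB matrix (i + k) k))
  lines.foldl (fun best line =>
    (PySem.List.pyRange 0 ((line.length : Int) - 4) 1).foldl (fun best s => max best (pvWin line s)) best) 0

-- ===== PRECONDITION & SPEC =====
-- Pre_ excludes exactly the inputs on which Python A raises IndexError: n ≥ 5 with some row shorter than n.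
def Pre_largest_product (matrix : List (List Int)) : Prop :=
  (matrix.length : Int) < 5 ∨ ∀ row ∈ matrix, matrix.length ≤ row.length
instance (matrix : List (List Int)) : Decidable (Pre_largest_product matrix) := by
  unfold Pre_largest_product; infer_instance

def pvWitness_largest_product : List (List Int) :=
  [[1, 2, 3, 4, 5], [6, 7, 8, 9, 1], [2, 3, 4, 5, 6], [7, 8, 9, 1, 2], [3, 4, 5, 6, 7]]

def Spec_largest_product (matrix : List (List Int)) (out : Int) : Prop := out = largest_product_alt matrix
instance (matrix : List (List Int)) (out : Int) : Decidable (Spec_largest_product matrix out) := by unfold Spec_largest_product; infer_instance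

-- ===== CLAIM (what is proved, stated in full; the proofs are below) =====
def Claim_equal_largest_product : Prop := ∀ (matrix : List (List Int)), Dom_largest_product matrix → Pre_largest_product matrix → Spec_largest_product matrix (largest_product matrix)

-- ===== LEMMAS AND PROOFS =====

-- the three kinds of 5-products A considers at start cell (i, j): row, column, down-right diagonal
def pvRP (m : List (List Int)) (i j : Int) : Int :=
  pvCellA m i j * pvCellA m i (j+1) * pvCellA m i (j+2) * pvCellA m i (j+3) * pvCellA m i (j+4)
def pvCP (m : List (List Int)) (i j : Int) : Int :=
  pvCellA m i j * pvCellA m (i+1) j * pvCellA m (i+2) j * pvCellA m (i+3) j * pvCellA m (i+4) j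
def pvDP (m : List (List Int)) (i j : Int) : Int :=
  pvCellA m i j * pvCellA m (i+1) (j+1) * pvCellA m (i+2) (j+2) * pvCellA m (i+3) (j+3) * pvCellA m (i+4) (j+4)

-- the (at most three) candidates A's inner body folds max over at cell (i, j)
def pvThree (m : List (List Int)) (n i j : Int) : List Int :=
  (if j + 4 < n then [pvRP m i j] else []) ++ (if i + 4 < n then [pvCP m i j] else []) ++
  (if i + 4 < n ∧ j + 4 < n then [pvDP m i j] else [])

-- all candidates of A, in A's traversal order
def pvCandA (m : List (List Int)) : List Int :=
  (PySem.List.pyRange 0 m.length 1).flatMap (fun i =>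
    (PySem.List.pyRange 0 m.length 1).flatMap (fun j => pvThree m m.length i j))

-- all window products of B, in B's traversal order
def pvWins (line : List Int) : List Int :=
  (PySem.List.pyRange 0 ((line.length : Int) - 4) 1).map (pvWin line)

def pvCandB (m : List (List Int)) : List Int :=
  ((PySem.List.pyRange 0 (m.length : Int) 1).map (fun i => (PySem.List.pyRange 0 (m.length : Int) 1).map (fun j => pvCellB m i j))
    ++ (PySem.List.pyRange 0 (m.length : Int) 1).map (fun j => (PySem.List.pyRange 0 (m.length : Int) 1).map (fun i => pvCellB m i j))
    ++ (PySem.List.pyRange 0 (m.length : Int) 1).map (fun j => (PySem.List.pyRange 0 ((m.length : Int) - j) 1).map (fun k => pvCellB m k (j + k)))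
    ++ (PySem.List.pyRange 1 (m.length : Int) 1).map (fun i => (PySem.List.pyRange 0 ((m.length : Int) - i) 1).map (fun k => pvCellB m (i + k) k))).flatMap pvWins

-- a fold whose step folds max over a block is the max-fold over the concatenation of blocks
lemma pv_foldl_foldl_max {α : Type} (f : α → List Int) (l : List α) (a : Int) :
    l.foldl (fun acc x => (f x).foldl max acc) a = (l.flatMap f).foldl max a := by
  induction l generalizing a with
  | nil => rfl
  | cons x t ih => simp [List.flatMap_cons, List.foldl_append, ih]

lemma pv_foldl_max_map (l : List Int) (h : Int → Int) (a : Int) :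
    l.foldl (fun acc x => max acc (h x)) a = (l.map h).foldl max a := by
  induction l generalizing a with
  | nil => rfl
  | cons x t ih => simp [List.foldl, ih]

lemma pvA_eq (m : List (List Int)) : largest_product m = (pvCandA m).foldl max 0 := by
  unfold largest_product pvCandA
  rw [← pv_foldl_foldl_max]
  apply PySem.List.foldl_congr_mem
  intro acc i _
  rw [← pv_foldl_foldl_max]
  apply PySem.List.foldl_congr_mem
  intro acc j _
  simp only [pvThree, pvRP, pvCP, pvDP, List.foldl_append]
  split_ifs <;> simp [List.foldl]

lemma pvB_eq (m : List (List Int)) (h : ¬ ((m.length : Int) < 5)) :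
    largest_product_alt m = (pvCandB m).foldl max 0 := by
  unfold largest_product_alt pvCandB
  simp only [if_neg h]
  rw [← pv_foldl_foldl_max]
  apply PySem.List.foldl_congr_mem
  intro acc line _
  rw [pv_foldl_max_map]
  rfl

-- the windows of a line built as a comprehension over range(L), as a map over the window starts
lemma pvWins_map_pyRange (f : Int → Int) (L : Int) (hL : 0 ≤ L) :
    pvWins ((PySem.List.pyRange 0 L 1).map f) =
      (PySem.List.pyRange 0 (L - 4) 1).map
        (fun s => f s * f (s+1) * f (s+2) * f (s+3) * f (s+4)) := by
  unfold pvWins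
  have hlen : (((PySem.List.pyRange 0 L 1).map f).length : Int) = L := by
    simp [PySem.List.length_pyRange_one]; omega
  rw [hlen]
  apply List.map_congr_left
  intro s hs
  rw [PySem.List.mem_pyRange_one] at hs
  unfold pvWin
  rw [PySem.List.pyGetD_map_pyRange_of_nonneg f L s 0 (by omega) (by omega),
      PySem.List.pyGetD_map_pyRange_of_nonneg f L (s+1) 0 (by omega) (by omega),
      PySem.List.pyGetD_map_pyRange_of_nonneg f L (s+2) 0 (by omega) (by omega),
      PySem.List.pyGetD_map_pyRange_of_nonneg f L (s+3) 0 (by omega) (by omega),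
      PySem.List.pyGetD_map_pyRange_of_nonneg f L (s+4) 0 (by omega) (by omega)]

lemma pvRP_eq (m : List (List Int)) (i s : Int) :
    pvCellB m i s * pvCellB m i (s+1) * pvCellB m i (s+2) * pvCellB m i (s+3) * pvCellB m i (s+4) = pvRP m i s := rfl
lemma pvCP_eq (m : List (List Int)) (j s : Int) :
    pvCellB m s j * pvCellB m (s+1) j * pvCellB m (s+2) j * pvCellB m (s+3) j * pvCellB m (s+4) j = pvCP m s j := rfl
lemma pvDP_eq1 (m : List (List Int)) (j s : Int) :
    pvCellB m s (j+s) * pvCellB m (s+1) (j+(s+1)) * pvCellB m (s+2) (j+(s+2)) *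
    pvCellB m (s+3) (j+(s+3)) * pvCellB m (s+4) (j+(s+4)) = pvDP m s (j+s) := by
  simp only [pvDP, pvCellB, pvCellA, add_assoc]
lemma pvDP_eq2 (m : List (List Int)) (i s : Int) :
    pvCellB m (i+s) s * pvCellB m (i+(s+1)) (s+1) * pvCellB m (i+(s+2)) (s+2) *
    pvCellB m (i+(s+3)) (s+3) * pvCellB m (i+(s+4)) (s+4) = pvDP m (i+s) s := by
  simp only [pvDP, pvCellB, pvCellA, add_assoc]

-- A and B produce the same SET of candidate products (orders and multiplicities differ)
lemma pv_mem_iff (m : List (List Int)) (x : Int) : x ∈ pvCandA m ↔ x ∈ pvCandB m := by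
  simp only [pvCandA, pvThree, List.mem_flatMap, List.mem_append, PySem.List.mem_pyRange_one,
    List.mem_ite_nil_right, List.mem_singleton, pvCandB, List.flatMap_append, List.flatMap_map]
  have hn : (0:Int) ≤ (m.length : Int) := Int.natCast_nonneg _
  constructor
  · rintro ⟨i, ⟨hi0, hin⟩, j, ⟨hj0, hjn⟩, (⟨hj4, rfl⟩ | ⟨hi4, rfl⟩) | ⟨⟨hi4, hj4⟩, rfl⟩⟩
    · refine Or.inl (Or.inl (Or.inl ⟨i, ⟨hi0, hin⟩, ?_⟩))
      rw [pvWins_map_pyRange _ _ (by omega)]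
      simp only [List.mem_map, PySem.List.mem_pyRange_one]
      exact ⟨j, ⟨hj0, by omega⟩, pvRP_eq m i j⟩
    · refine Or.inl (Or.inl (Or.inr ⟨j, ⟨hj0, hjn⟩, ?_⟩))
      rw [pvWins_map_pyRange _ _ (by omega)]
      simp only [List.mem_map, PySem.List.mem_pyRange_one]
      exact ⟨i, ⟨hi0, by omega⟩, pvCP_eq m j i⟩
    · by_cases hij : i ≤ j
      · refine Or.inl (Or.inr ⟨j - i, ⟨by omega, by omega⟩, ?_⟩)
        rw [pvWins_map_pyRange _ _ (by omega)]
        simp only [List.mem_map, PySem.List.mem_pyRange_one]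
        refine ⟨i, ⟨by omega, by omega⟩, ?_⟩
        have e : j - i + i = j := by omega
        rw [pvDP_eq1, e]
      · refine Or.inr ⟨i - j, ⟨by omega, by omega⟩, ?_⟩
        rw [pvWins_map_pyRange _ _ (by omega)]
        simp only [List.mem_map, PySem.List.mem_pyRange_one]
        refine ⟨j, ⟨by omega, by omega⟩, ?_⟩
        have e : i - j + j = i := by omega
        rw [pvDP_eq2, e]
  · rintro (((⟨i, ⟨hi0, hin⟩, hx⟩ | ⟨j, ⟨hj0, hjn⟩, hx⟩) | ⟨j, ⟨hj0, hjn⟩, hx⟩) | ⟨i, ⟨hi1, hin⟩, hx⟩) <;>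
      rw [pvWins_map_pyRange _ _ (by omega)] at hx <;>
      simp only [List.mem_map, PySem.List.mem_pyRange_one] at hx <;>
      obtain ⟨s, ⟨hs0, hs⟩, rfl⟩ := hx
    · exact ⟨i, ⟨hi0, hin⟩, s, ⟨hs0, by omega⟩, Or.inl (Or.inl ⟨by omega, (pvRP_eq m i s).symm⟩)⟩
    · exact ⟨s, ⟨hs0, by omega⟩, j, ⟨hj0, hjn⟩, Or.inl (Or.inr ⟨by omega, (pvCP_eq m j s).symm⟩)⟩
    · exact ⟨s, ⟨hs0, by omega⟩, j + s, ⟨by omega, by omega⟩,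
        Or.inr ⟨⟨by omega, by omega⟩, pvDP_eq1 m j s⟩⟩
    · exact ⟨i + s, ⟨by omega, by omega⟩, s, ⟨hs0, by omega⟩,
        Or.inr ⟨⟨by omega, by omega⟩, pvDP_eq2 m i s⟩⟩

-- a max-fold from 0 depends only on the set of elements
lemma pv_foldl_max_set_eq (l1 l2 : List Int) (h : ∀ x, x ∈ l1 ↔ x ∈ l2) :
    l1.foldl max 0 = l2.foldl max 0 := by
  apply le_antisymm
  · rcases PySem.List.foldl_max_mem l1 0 with h0 | hm
    · rw [h0]; exact (PySem.List.le_foldl_max l2 0).1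
    · exact (PySem.List.le_foldl_max l2 0).2 _ ((h _).1 hm)
  · rcases PySem.List.foldl_max_mem l2 0 with h0 | hm
    · rw [h0]; exact (PySem.List.le_foldl_max l1 0).1
    · exact (PySem.List.le_foldl_max l1 0).2 _ ((h _).2 hm)

-- ===== VERDICT (by name: the statement is the Claim_ definition above) =====
theorem largest_product_spec : Claim_equal_largest_product := by
  unfold Claim_equal_largest_product Spec_largest_product
  intro m _ _
  by_cases h : (m.length : Int) < 5
  · have halt : largest_product_alt m = 0 := by unfold largest_product_alt; simp only [if_pos h]
    rw [halt, pvA_eq]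
    rcases PySem.List.foldl_max_mem (pvCandA m) 0 with h0 | hm
    · exact h0
    · exfalso
      simp only [pvCandA, pvThree, List.mem_flatMap, PySem.List.mem_pyRange_one, List.mem_append,
        List.mem_ite_nil_right, List.mem_singleton] at hm
      rcases hm with ⟨i, ⟨hi0, hin⟩, j, ⟨hj0, hjn⟩, (⟨hj4, _⟩ | ⟨hi4, _⟩) | ⟨⟨hi4, hj4⟩, _⟩⟩ <;> omega
  · rw [pvA_eq, pvB_eq m h]
    exact pv_foldl_max_set_eq _ _ (pv_mem_iff m)
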